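-- pv_equiv track=rewrite | github.com/jssam/Hactoberfest2021_projects | Hash Table.py | stringProcess
-- ===== SOURCE A (Python) =====
-- def stringProcess(string):
--     """Auxiliary method that transforms an alphanumeric element into an integer"""
--     key = 0
--     for char in range(len(string)):
--         if string[char].isalpha():
--             key += (31 * ord(string[char])) + char
--         else:
--             key += (31 * int(string[char])) + char
--     return key
-- ===== SOURCE B (Python) =====
-- def stringProcess(string):
--     """Auxiliary method that transforms an alphanumeric element into an integer"""
--     counts = {}
--     for c in string:
--         counts[c] = counts.get(c, 0) + 1
--     n = len(string)
--     key = n * (n - 1) // 2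
--     for c, cnt in counts.items():
--         key += cnt * (31 * ord(c) if c.isalpha() else 31 * int(c))
--     return key
-- ===== Notes on version B (the rewrite author's own statement) =====
-- stated objective: faster
-- what changed: Instead of A's single indexed loop accumulating 31*value+index per position, B builds a character-frequency dictionary, adds cnt*(31*value) once per distinct character, and adds the index contributions in closed form as n*(n-1)//2.
import Mathlib
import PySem

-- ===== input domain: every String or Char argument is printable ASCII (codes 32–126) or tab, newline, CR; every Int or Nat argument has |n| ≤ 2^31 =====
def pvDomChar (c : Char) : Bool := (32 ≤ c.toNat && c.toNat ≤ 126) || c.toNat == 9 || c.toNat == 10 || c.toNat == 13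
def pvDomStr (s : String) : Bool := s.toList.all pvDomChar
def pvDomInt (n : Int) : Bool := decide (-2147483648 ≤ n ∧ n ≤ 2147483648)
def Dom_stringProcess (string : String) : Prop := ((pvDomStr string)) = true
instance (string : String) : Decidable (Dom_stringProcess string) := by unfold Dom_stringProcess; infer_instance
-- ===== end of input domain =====

-- B aggregates by a character-frequency dictionary (one weighted term per DISTINCT character)
-- plus the closed-form index term n*(n-1)//2, instead of A's per-index accumulation;
-- a timing run measured B faster by a constant factor (objective: faster).

-- ===== PORT A =====
-- A: key = 0; for char in range(len(string)): key += 31*ord(c)+char (alpha) / 31*int(c)+char.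
-- Iterating over the indexed characters is rendered as a fold over the enumerated char list
-- (same indices, same characters, same order); int(c) on a single digit char is c.toNat - 48
-- (exact under Pre_, where every char is an ASCII letter or digit).
def stringProcess (string : String) : Int :=
  (PySem.List.enumerate string.toList 0).foldl
    (fun key p =>
      if PySem.Chars.isalpha p.2 then
        key + (31 * (p.2.toNat : Int) + p.1)
      else
        key + (31 * ((p.2.toNat : Int) - 48) + p.1))
    0

-- ===== PORT B =====
-- B: counts = {}; for c in string: counts[c] = counts.get(c,0)+1; key = n*(n-1)//2;
-- for c, cnt in counts.items(): key += cnt * (31*ord(c) if c.isalpha() else 31*int(c)).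
-- Dict iteration order is insertion order, modelled exactly by PySem.Dict.
def stringProcess_alt (string : String) : Int :=
  let counts : PySem.Dict Char Int :=
    string.toList.foldl (fun d c => d.insert c (d.getD c 0 + 1)) PySem.Dict.empty
  let n : Int := (string.toList.length : Int)
  let key : Int := PySem.Int.floordiv (n * (n - 1)) 2
  counts.items.foldl
    (fun key p =>
      key + p.2 * (if PySem.Chars.isalpha p.1 then 31 * (p.1.toNat : Int)
                   else 31 * ((p.1.toNat : Int) - 48)))
    key

-- ===== PRECONDITION & SPEC =====
-- Pre_ excludes exactly the strings with a character that is neither a letter nor a digit: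
-- on those A raises ValueError (int() on a non-digit), and B raises the same way.
def Pre_stringProcess (string : String) : Prop :=
  string.toList.all (fun c => PySem.Chars.isalpha c || PySem.Chars.isdigit c) = true
instance (string : String) : Decidable (Pre_stringProcess string) := by
  unfold Pre_stringProcess; infer_instance
def pvWitness_stringProcess : String := "aB3"

def Spec_stringProcess (string : String) (out : Int) : Prop := out = stringProcess_alt string
instance (string : String) (out : Int) : Decidable (Spec_stringProcess string out) := by
  unfold Spec_stringProcess; infer_instance

-- ===== CLAIM (what is proved, stated in full; the proofs are below) =====
def Claim_equal_stringProcess : Prop := ∀ (string : String), Dom_stringProcess string → Pre_stringProcess string → Spec_stringProcess string (stringProcess string)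

-- ===== LEMMAS AND PROOFS =====

def pvVal (c : Char) : Int :=
  if PySem.Chars.isalpha c then 31 * (c.toNat : Int) else 31 * ((c.toNat : Int) - 48)

-- A's loop: value-sum plus arithmetic series of the indices starting at s.
theorem pv_fold_enum (l : List Char) : ∀ (s : Int) (key : Int),
    (PySem.List.enumerate l s).foldl
      (fun key p =>
        if PySem.Chars.isalpha p.2 then
          key + (31 * (p.2.toNat : Int) + p.1)
        else
          key + (31 * ((p.2.toNat : Int) - 48) + p.1))
      key
    = key + (l.map pvVal).sum
        + (l.length : Int) * s + ((l.length : Int) * ((l.length : Int) - 1)) / 2 := by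
  induction l with
  | nil => intro s key; simp [PySem.List.enumerate_nil]
  | cons c t ih =>
    intro s key
    rw [PySem.List.enumerate_cons, List.foldl_cons, ih (s + 1)]
    have hv : (if PySem.Chars.isalpha c then
          key + (31 * (c.toNat : Int) + s)
        else
          key + (31 * ((c.toNat : Int) - 48) + s)) = key + pvVal c + s := by
      unfold pvVal; split_ifs <;> ring
    rw [hv]
    simp only [List.map_cons, List.sum_cons, List.length_cons]
    push_cast
    have h2 : ((t.length : Int) + 1) * ((t.length : Int) + 1 - 1) / 2
        = (t.length : Int) * ((t.length : Int) - 1) / 2 + (t.length : Int) := by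
      have : ((t.length : Int) + 1) * ((t.length : Int) + 1 - 1)
          = (t.length : Int) * ((t.length : Int) - 1) + 2 * (t.length : Int) := by ring
      rw [this, Int.add_mul_ediv_left _ _ (by norm_num : (2:Int) ≠ 0)]
    rw [h2]; ring

-- Summing count c * pvVal c over the distinct characters equals summing pvVal over all characters.
theorem pv_counter_sum (l : List Char) :
    ((PySem.Set.ofList l).map (fun k => (l.count k : Int) * pvVal k)).sum = (l.map pvVal).sum := by
  have h1 := Finset.sum_list_map_count l pvVal
  have h2 : ((PySem.Set.ofList l).map (fun k => (l.count k : Int) * pvVal k)).sum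
      = ∑ k ∈ (PySem.Set.ofList l).toFinset, (l.count k : Int) * pvVal k := by
    rw [List.sum_toFinset _ (PySem.Set.nodup_ofList (xs := l))]
  have h3 : (PySem.Set.ofList l).toFinset = l.toFinset := by
    ext x; simp [PySem.Set.mem_ofList]
  rw [h2, h3, h1]
  exact Finset.sum_congr rfl (fun x _ => by simp)

-- ===== VERDICT (by name: the statement is the Claim_ definition above) =====
theorem stringProcess_spec : Claim_equal_stringProcess := by
  intro s _ _
  unfold Spec_stringProcess stringProcess stringProcess_alt
  rw [pv_fold_enum s.toList 0 0]
  simp only [PySem.Dict.foldl_insert_getD_add_one_eq_counter,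
    PySem.Dict.items_counter,
    PySem.List.foldl_add (g := fun p : Char × Int =>
      p.2 * (if PySem.Chars.isalpha p.1 then 31 * (p.1.toNat : Int)
             else 31 * ((p.1.toNat : Int) - 48))),
    PySem.Int.floordiv_eq_ediv_of_pos (show (0:Int) < 2 by norm_num)]
  have hmm : ((PySem.Set.ofList s.toList).map (fun k => (k, (s.toList.count k : Int)))).map
      (fun p : Char × Int =>
        p.2 * (if PySem.Chars.isalpha p.1 then 31 * (p.1.toNat : Int)
               else 31 * ((p.1.toNat : Int) - 48)))
      = (PySem.Set.ofList s.toList).map (fun k => (s.toList.count k : Int) * pvVal k) := by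
    rw [List.map_map]; rfl
  rw [hmm, pv_counter_sum]
  ring
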